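-- pv_equiv track=rewrite | github.com/Purva1307/ai-resume-intelligence-system | src/scorer.py | get_missing_skills_with_severity
-- ===== SOURCE A (Python) =====
-- from typing import Dict, List, Tuple
--
-- WEIGHTS = {
--     "programming": 0.35,
--     "ai_ml": 0.30,
--     "data": 0.20,
--     "tools": 0.10,
--     "web": 0.05,
-- }
--
-- def get_missing_skills_with_severity(
--     resume_skills: Dict[str, List[str]],
--     jd_skills: Dict[str, List[str]],
-- ):
--
--     critical, medium, low = [], [], []
--
--     for category, jd_list in jd_skills.items():
--
--         resume_list = resume_skills.get(category, [])
--         diff = set(jd_list) - set(resume_list)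
--
--         weight = WEIGHTS.get(category, 0.05)
--
--         for skill in diff:
--             if weight >= 0.30:
--                 critical.append(skill)
--             elif weight >= 0.15:
--                 medium.append(skill)
--             else:
--                 low.append(skill)
--
--     return {
--         "critical": sorted(set(critical)),
--         "medium": sorted(set(medium)),
--         "low": sorted(set(low)),
--     }
-- ===== SOURCE B (Python) =====
-- WEIGHTS = {
--     "programming": 0.35,
--     "ai_ml": 0.30,
--     "data": 0.20,
--     "tools": 0.10,
--     "web": 0.05,
-- }
--
--
-- def _severity_of(category):
--     w = WEIGHTS.get(category, 0.05)
--     return "critical" if w >= 0.30 else ("medium" if w >= 0.15 else "low")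
--
--
-- def get_missing_skills_with_severity(resume_skills, jd_skills):
--     def missing(sev):
--         out = set()
--         for category, jd_list in jd_skills.items():
--             if _severity_of(category) == sev:
--                 out |= set(jd_list) - set(resume_skills.get(category, []))
--         return sorted(out)
--
--     return {sev: missing(sev) for sev in ("critical", "medium", "low")}
-- ===== Notes on version B (the rewrite author's own statement) =====
-- stated objective: simpler
-- what changed: Instead of one pass that branches per skill into three accumulator lists and dedups at the end, B computes each severity bucket independently: it maps each category to a severity label once and, per severity, unions the per-category set differences directly into a set, so the per-skill branch and the final set(list) dedup disappear.
import Mathlib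
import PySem

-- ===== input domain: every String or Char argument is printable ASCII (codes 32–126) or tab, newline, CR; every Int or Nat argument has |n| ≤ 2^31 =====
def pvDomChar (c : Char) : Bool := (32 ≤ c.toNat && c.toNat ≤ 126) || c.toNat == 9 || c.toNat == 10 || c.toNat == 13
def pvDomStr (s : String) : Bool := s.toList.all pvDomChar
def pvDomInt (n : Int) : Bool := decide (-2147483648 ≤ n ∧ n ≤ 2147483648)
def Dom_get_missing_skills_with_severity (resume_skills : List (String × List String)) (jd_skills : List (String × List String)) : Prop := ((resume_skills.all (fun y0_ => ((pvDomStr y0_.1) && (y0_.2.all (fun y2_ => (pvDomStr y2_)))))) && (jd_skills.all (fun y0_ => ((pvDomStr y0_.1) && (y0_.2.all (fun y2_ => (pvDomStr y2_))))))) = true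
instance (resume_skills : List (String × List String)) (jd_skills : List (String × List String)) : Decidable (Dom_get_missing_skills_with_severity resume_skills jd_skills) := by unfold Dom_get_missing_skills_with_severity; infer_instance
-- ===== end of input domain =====

-- B replaces A's single pass (per-skill three-way branch + end dedup) by one independent
-- set-union pass per severity label; objective: simpler.


-- ===== PORT A =====
-- WEIGHTS values are exact multiples of 0.05, so they (and the thresholds 0.30, 0.15) are
-- ported scaled by 100 as integers: every float comparison in A is exact under this scaling.
def pvWeights : List (String × Int) :=
  [("programming", 35), ("ai_ml", 30), ("data", 20), ("tools", 10), ("web", 5)]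

-- d.get(k, []) on a dict given as an association list (first match)
def pvGetList (d : List (String × List String)) (k : String) : List String :=
  ((d.find? (fun q => q.1 == k)).map Prod.snd).getD []

-- WEIGHTS.get(category, 0.05), scaled by 100
def pvWeightOf (c : String) : Int :=
  ((pvWeights.find? (fun q => q.1 == c)).map Prod.snd).getD 5

def get_missing_skills_with_severity (resume_skills : List (String × List String)) (jd_skills : List (String × List String)) : List (String × List String) :=
  -- 'for skill in diff' iterates a Python set; here each skill's bucket depends only on the
  -- category, and each bucket is finally dedup'd and sorted, so the result is independent of
  -- the set's iteration order and the fold over the Set's element list is exact.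
  let res : List String × List String × List String :=
    jd_skills.foldl (fun (acc : List String × List String × List String) p =>
      let resume_list := pvGetList resume_skills p.1
      let diff : PySem.Set String := PySem.Set.diff (PySem.Set.ofList p.2) (PySem.Set.ofList resume_list)
      let weight := pvWeightOf p.1
      diff.foldl (fun (acc : List String × List String × List String) skill =>
        if weight ≥ 30 then (acc.1 ++ [skill], acc.2.1, acc.2.2)
        else if weight ≥ 15 then (acc.1, acc.2.1 ++ [skill], acc.2.2)
        else (acc.1, acc.2.1, acc.2.2 ++ [skill])) acc) ([], [], [])
  [("critical", PySem.List.sorted (PySem.Set.ofList res.1) (fun x => x) false),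
   ("medium",   PySem.List.sorted (PySem.Set.ofList res.2.1) (fun x => x) false),
   ("low",      PySem.List.sorted (PySem.Set.ofList res.2.2) (fun x => x) false)]

-- ===== PORT B =====
def pvSeverityOf (c : String) : String :=
  let w := pvWeightOf c
  if w ≥ 30 then "critical" else if w ≥ 15 then "medium" else "low"

def pvMissing (resume_skills : List (String × List String)) (jd_skills : List (String × List String)) (sev : String) : List String :=
  let out : PySem.Set String :=
    jd_skills.foldl (fun (out : PySem.Set String) p =>
      if pvSeverityOf p.1 == sev then
        PySem.Set.union out (PySem.Set.diff (PySem.Set.ofList p.2) (PySem.Set.ofList (pvGetList resume_skills p.1)))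
      else out) PySem.Set.empty
  PySem.List.sorted out (fun x => x) false

def get_missing_skills_with_severity_alt (resume_skills : List (String × List String)) (jd_skills : List (String × List String)) : List (String × List String) :=
  [("critical", pvMissing resume_skills jd_skills "critical"),
   ("medium",   pvMissing resume_skills jd_skills "medium"),
   ("low",      pvMissing resume_skills jd_skills "low")]

-- ===== PRECONDITION & SPEC =====
def Spec_get_missing_skills_with_severity (resume_skills : List (String × List String)) (jd_skills : List (String × List String)) (out : List (String × List String)) : Prop := out = get_missing_skills_with_severity_alt resume_skills jd_skills
instance (resume_skills : List (String × List String)) (jd_skills : List (String × List String)) (out : List (String × List String)) : Decidable (Spec_get_missing_skills_with_severity resume_skills jd_skills out) := by unfold Spec_get_missing_skills_with_severity; infer_instance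

-- ===== CLAIM (what is proved, stated in full; the proofs are below) =====
def Claim_equal_get_missing_skills_with_severity : Prop := ∀ (resume_skills : List (String × List String)) (jd_skills : List (String × List String)), Dom_get_missing_skills_with_severity resume_skills jd_skills → Spec_get_missing_skills_with_severity resume_skills jd_skills (get_missing_skills_with_severity resume_skills jd_skills)

-- ===== LEMMAS AND PROOFS =====

-- the per-category set difference both programs use
def pvDiffOf (rs : List (String × List String)) (p : String × List String) : PySem.Set String :=
  PySem.Set.diff (PySem.Set.ofList p.2) (PySem.Set.ofList (pvGetList rs p.1))

-- A's inner per-skill loop: the branch is constant over the set, so it appends the whole diff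
lemma pv_inner (w : Int) (diff : List String) (acc : List String × List String × List String) :
    diff.foldl (fun (acc : List String × List String × List String) skill =>
        if w ≥ 30 then (acc.1 ++ [skill], acc.2.1, acc.2.2)
        else if w ≥ 15 then (acc.1, acc.2.1 ++ [skill], acc.2.2)
        else (acc.1, acc.2.1, acc.2.2 ++ [skill])) acc
    = if w ≥ 30 then (acc.1 ++ diff, acc.2.1, acc.2.2)
      else if w ≥ 15 then (acc.1, acc.2.1 ++ diff, acc.2.2)
      else (acc.1, acc.2.1, acc.2.2 ++ diff) := by
  induction diff generalizing acc with
  | nil => split_ifs <;> simp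
  | cons x xs ih =>
    rw [List.foldl_cons, ih]
    split_ifs with h1 h2 <;> simp

-- A's outer fold, in closed form
lemma pv_outer (rs : List (String × List String)) (js : List (String × List String))
    (acc : List String × List String × List String) :
    js.foldl (fun (acc : List String × List String × List String) p =>
      let resume_list := pvGetList rs p.1
      let diff : PySem.Set String := PySem.Set.diff (PySem.Set.ofList p.2) (PySem.Set.ofList resume_list)
      let weight := pvWeightOf p.1
      diff.foldl (fun (acc : List String × List String × List String) skill =>
        if weight ≥ 30 then (acc.1 ++ [skill], acc.2.1, acc.2.2)
        else if weight ≥ 15 then (acc.1, acc.2.1 ++ [skill], acc.2.2)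
        else (acc.1, acc.2.1, acc.2.2 ++ [skill])) acc) acc
    = (acc.1 ++ js.flatMap (fun p => if pvWeightOf p.1 ≥ 30 then pvDiffOf rs p else []),
       acc.2.1 ++ js.flatMap (fun p => if pvWeightOf p.1 ≥ 30 then [] else if pvWeightOf p.1 ≥ 15 then pvDiffOf rs p else []),
       acc.2.2 ++ js.flatMap (fun p => if pvWeightOf p.1 ≥ 30 then [] else if pvWeightOf p.1 ≥ 15 then [] else pvDiffOf rs p)) := by
  induction js generalizing acc with
  | nil => simp
  | cons q qs ih =>
    rw [List.foldl_cons]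
    simp only []
    rw [pv_inner, ih]
    simp only [List.flatMap_cons, pvDiffOf]
    split_ifs with h1 h2 <;> simp

-- membership in B's accumulated set
lemma pv_memB (rs : List (String × List String)) (js : List (String × List String))
    (sev : String) (s : PySem.Set String) (x : String) :
    x ∈ js.foldl (fun (out : PySem.Set String) p =>
        if pvSeverityOf p.1 == sev then
          PySem.Set.union out (PySem.Set.diff (PySem.Set.ofList p.2) (PySem.Set.ofList (pvGetList rs p.1)))
        else out) s
    ↔ x ∈ s ∨ ∃ p ∈ js, pvSeverityOf p.1 = sev ∧ x ∈ pvDiffOf rs p := by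
  induction js generalizing s with
  | nil => simp
  | cons q qs ih =>
    rw [List.foldl_cons, ih]
    by_cases h : pvSeverityOf q.1 = sev <;>
      simp [h, PySem.Set.mem_union, pvDiffOf, or_assoc]

-- B's accumulated set is Nodup
lemma pv_nodupB (rs : List (String × List String)) (js : List (String × List String))
    (sev : String) (s : PySem.Set String) (hs : s.Nodup) :
    (js.foldl (fun (out : PySem.Set String) p =>
        if pvSeverityOf p.1 == sev then
          PySem.Set.union out (PySem.Set.diff (PySem.Set.ofList p.2) (PySem.Set.ofList (pvGetList rs p.1)))
        else out) s).Nodup := by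
  induction js generalizing s with
  | nil => simpa
  | cons q qs ih =>
    rw [List.foldl_cons]
    apply ih
    split_ifs with h
    · exact PySem.Set.nodup_union _ _ hs
    · exact hs

-- severity label ↔ weight thresholds
lemma pv_sev_critical (c : String) : pvSeverityOf c = "critical" ↔ pvWeightOf c ≥ 30 := by
  by_cases h1 : pvWeightOf c ≥ 30
  · simp [pvSeverityOf, h1]
  · by_cases h2 : pvWeightOf c ≥ 15 <;> simp [pvSeverityOf, h1, h2]
lemma pv_sev_medium (c : String) : pvSeverityOf c = "medium" ↔ (¬ pvWeightOf c ≥ 30 ∧ pvWeightOf c ≥ 15) := by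
  by_cases h1 : pvWeightOf c ≥ 30
  · simp [pvSeverityOf, h1]
  · by_cases h2 : pvWeightOf c ≥ 15 <;> simp [pvSeverityOf, h1, h2]
lemma pv_sev_low (c : String) : pvSeverityOf c = "low" ↔ (¬ pvWeightOf c ≥ 30 ∧ ¬ pvWeightOf c ≥ 15) := by
  by_cases h1 : pvWeightOf c ≥ 30
  · simp [pvSeverityOf, h1]
  · by_cases h2 : pvWeightOf c ≥ 15 <;> simp [pvSeverityOf, h1, h2]

-- one bucket: A's sorted-dedup list equals B's sorted set, given matching conditions
lemma pv_bucket (rs : List (String × List String)) (js : List (String × List String))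
    (sev : String) (f : String × List String → List String)
    (hf : ∀ p x, x ∈ f p ↔ (pvSeverityOf p.1 = sev ∧ x ∈ pvDiffOf rs p)) :
    PySem.List.sorted (PySem.Set.ofList (js.flatMap f)) (fun x => x) false
      = pvMissing rs js sev := by
  unfold pvMissing
  apply PySem.List.sorted_eq_sorted_of_perm _ _ _ (fun _ _ h => h)
  rw [List.perm_ext_iff_of_nodup (PySem.Set.nodup_ofList _)
        (pv_nodupB rs js sev PySem.Set.empty (by simp [PySem.Set.empty]))]
  intro x
  rw [PySem.Set.mem_ofList, List.mem_flatMap, pv_memB]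
  simp only [PySem.Set.empty, List.not_mem_nil, false_or, pvDiffOf]
  constructor
  · rintro ⟨p, hp, hx⟩; exact ⟨p, hp, (hf p x).1 hx⟩
  · rintro ⟨p, hp, h1, h2⟩; exact ⟨p, hp, (hf p x).2 ⟨h1, h2⟩⟩

-- ===== VERDICT (by name: the statement is the Claim_ definition above) =====
theorem get_missing_skills_with_severity_spec : Claim_equal_get_missing_skills_with_severity := by
  intro rs js _
  unfold Spec_get_missing_skills_with_severity
  unfold get_missing_skills_with_severity get_missing_skills_with_severity_alt
  simp only []
  rw [pv_outer]
  simp only [List.nil_append]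
  congr 1
  · congr 1
    exact pv_bucket rs js "critical" _ (by
      intro p x
      rw [pv_sev_critical]
      split_ifs with h <;> simp [h])
  congr 1
  · congr 1
    exact pv_bucket rs js "medium" _ (by
      intro p x
      rw [pv_sev_medium]
      by_cases h1 : pvWeightOf p.1 ≥ 30
      · simp [h1]
      · by_cases h2 : pvWeightOf p.1 ≥ 15 <;> simp [h1, h2])
  congr 1
  · congr 1
    exact pv_bucket rs js "low" _ (by
      intro p x
      rw [pv_sev_low]
      by_cases h1 : pvWeightOf p.1 ≥ 30
      · simp [h1]
      · by_cases h2 : pvWeightOf p.1 ≥ 15 <;> simp [h1, h2])
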